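-- pv_equiv track=rewrite | github.com/LineageOS/scripts | dev/apk/apk_extract.py | normalize_mnc_qualifier
-- ===== SOURCE A (Python) =====
-- def normalize_mnc_qualifier(name: str) -> str:
--     parts = name.split('-')
--
--     for i, part in enumerate(parts):
--         if not part.startswith('mnc'):
--             continue
--
--         digits = part[3:]
--         if digits.isdigit() and len(digits) == 1:
--             digits = f'0{digits}'
--
--         parts[i] = 'mnc' + digits
--
--     return '-'.join(parts)
-- ===== SOURCE B (Python) =====
-- def _fix(seg):
--     if len(seg) == 4 and seg[:3] == 'mnc' and seg[3:].isdigit():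
--         return 'mnc0' + seg[3:]
--     return seg
--
--
-- def normalize_mnc_qualifier(name: str) -> str:
--     out = ''
--     seg = ''
--     for ch in name:
--         if ch == '-':
--             out += _fix(seg) + '-'
--             seg = ''
--         else:
--             seg += ch
--     return out + _fix(seg)
-- ===== Notes on version B (the rewrite author's own statement) =====
-- stated objective: alternative
-- what changed: Replaced split-into-list / index-rewrite loop / join with a single left-to-right character scan that emits each dash-delimited segment (zero-padded when it is mnc plus one digit) as it is completed, never building the parts list.
import Mathlib
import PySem

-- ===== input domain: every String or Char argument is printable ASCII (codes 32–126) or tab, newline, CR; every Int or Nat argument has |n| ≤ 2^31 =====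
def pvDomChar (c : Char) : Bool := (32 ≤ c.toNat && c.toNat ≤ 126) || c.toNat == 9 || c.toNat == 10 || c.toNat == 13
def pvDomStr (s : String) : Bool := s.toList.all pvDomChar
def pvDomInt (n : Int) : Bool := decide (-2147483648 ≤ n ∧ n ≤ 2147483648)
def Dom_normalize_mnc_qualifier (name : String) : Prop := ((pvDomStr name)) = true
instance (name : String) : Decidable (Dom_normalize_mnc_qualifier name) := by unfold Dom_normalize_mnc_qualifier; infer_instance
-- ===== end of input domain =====

-- B replaces split/loop/join with a single character scan emitting segments as they close (alternative decomposition, same cost).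

-- ===== PORT A =====
-- body of A's for-loop: parts[i] = 'mnc' + digits (continue keeps the part unchanged)
def pvFixA (part : List Char) : List Char :=
  if !(PySem.Chars.startswith part ['m', 'n', 'c']) then part
  else
    let digits := PySem.Chars.slice part (some (3 : Int)) none
    let digits := if PySem.Chars.strIsdigit digits && digits.length == 1 then '0' :: digits else digits
    ['m', 'n', 'c'] ++ digits

def normalize_mnc_qualifier (name : String) : String :=
  let parts := PySem.Chars.splitOn name.toList ['-']
  String.ofList (PySem.Chars.join ['-'] (parts.map pvFixA))

-- ===== PORT B =====
-- Source B's _fix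
def pvFixB (seg : List Char) : List Char :=
  if seg.length == 4 && (PySem.Chars.slice seg none (some (3 : Int)) == ['m', 'n', 'c'])
      && PySem.Chars.strIsdigit (PySem.Chars.slice seg (some (3 : Int)) none) then
    ['m', 'n', 'c', '0'] ++ PySem.Chars.slice seg (some (3 : Int)) none
  else seg

-- Source B's for-loop over the characters, state = (out, seg)
def pvStepB (st : List Char × List Char) (ch : Char) : List Char × List Char :=
  if ch = '-' then (st.1 ++ pvFixB st.2 ++ ['-'], []) else (st.1, st.2 ++ [ch])

def normalize_mnc_qualifier_alt (name : String) : String :=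
  let st := name.toList.foldl pvStepB ([], [])
  String.ofList (st.1 ++ pvFixB st.2)

-- ===== PRECONDITION & SPEC =====
def Spec_normalize_mnc_qualifier (name : String) (out : String) : Prop := out = normalize_mnc_qualifier_alt name
instance (name : String) (out : String) : Decidable (Spec_normalize_mnc_qualifier name out) := by unfold Spec_normalize_mnc_qualifier; infer_instance

-- ===== CLAIM (what is proved, stated in full; the proofs are below) =====
def Claim_equal_normalize_mnc_qualifier : Prop := ∀ (name : String), Dom_normalize_mnc_qualifier name → Spec_normalize_mnc_qualifier name (normalize_mnc_qualifier name)

-- ===== LEMMAS AND PROOFS =====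

-- structural characterization of splitOn on the single-char separator '-': cur is the reversed current segment
def pvSegs : List Char → List Char → List (List Char)
  | [], cur => [cur.reverse]
  | c :: rest, cur => if c = '-' then cur.reverse :: pvSegs rest [] else pvSegs rest (c :: cur)

theorem pvSegs_ne_nil (l cur : List Char) : pvSegs l cur ≠ [] := by
  induction l generalizing cur with
  | nil => simp [pvSegs]
  | cons c rest ih =>
    simp only [pvSegs]
    split_ifs
    · simp
    · exact ih _

theorem pvGo_eq (l : List Char) : ∀ (fuel : Nat) (cur : List Char) (acc : List (List Char)), l.length ≤ fuel →
    PySem.Chars.splitOn.go ['-'] fuel l cur acc = acc.reverse ++ pvSegs l cur := by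
  induction l with
  | nil =>
    intro fuel cur acc _
    cases fuel <;> simp [PySem.Chars.splitOn.go, pvSegs]
  | cons c rest ih =>
    intro fuel cur acc h
    cases fuel with
    | zero => simp at h
    | succ n =>
      simp only [PySem.Chars.splitOn.go, List.isPrefixOf, List.length_cons] at *
      by_cases hc : c = '-'
      · subst hc
        simp only [beq_self_eq_true, Bool.true_and, if_pos]
        show PySem.Chars.splitOn.go ['-'] n rest [] (cur.reverse :: acc) = _
        rw [ih n [] (cur.reverse :: acc) (by omega)]
        simp [pvSegs]
      · rw [if_neg (by simp only [List.isPrefixOf, Bool.and_eq_true, beq_iff_eq]; exact fun h => hc h.1.symm)]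
        rw [ih n (c :: cur) acc (by omega)]
        simp only [pvSegs, if_neg hc]

theorem pvSplitOn_eq (s : List Char) : PySem.Chars.splitOn s ['-'] = pvSegs s [] := by
  unfold PySem.Chars.splitOn
  rw [pvGo_eq s (s.length + 1) [] [] (by omega)]
  simp

-- the two per-segment fixers agree
theorem pvFix_eq (seg : List Char) : pvFixA seg = pvFixB seg := by
  unfold pvFixA pvFixB
  simp only [PySem.Chars.slice_eq_listSlice]
  rw [PySem.List.slice_to seg (by omega), PySem.List.slice_from seg (by omega)]
  by_cases hp : ['m','n','c'] <+: seg
  · obtain ⟨t, rfl⟩ := hp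
    rw [show PySem.Chars.startswith (['m','n','c'] ++ t) ['m','n','c'] = true by
      simp [PySem.Chars.startswith, List.isPrefixOf_iff_prefix]]
    simp only [Bool.not_true, Bool.false_eq_true, if_false]
    have hd : List.drop (Int.toNat 3) (['m','n','c'] ++ t) = t := rfl
    have ht : List.take (Int.toNat 3) (['m','n','c'] ++ t) = ['m','n','c'] := rfl
    rw [hd, ht]
    by_cases hdig : (PySem.Chars.strIsdigit t && t.length == 1) = true
    · simp only [Bool.and_eq_true, beq_iff_eq] at hdig
      obtain ⟨h1, h2⟩ := hdig
      match t, h2 with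
      | [d], _ =>
        simp [PySem.Chars.strIsdigit] at h1 ⊢
        simp [h1]
    · rw [if_neg hdig]
      rw [if_neg]
      simp only [Bool.and_eq_true, beq_iff_eq] at hdig ⊢
      intro hcon
      obtain ⟨⟨hl, _⟩, hdt⟩ := hcon
      simp only [List.length_append] at hl
      exact hdig ⟨hdt, by simp at hl ⊢; omega⟩
  · rw [show (!PySem.Chars.startswith seg ['m','n','c']) = true by
      simp only [PySem.Chars.startswith, Bool.not_eq_true']
      exact Bool.eq_false_iff.mpr fun h => hp (List.isPrefixOf_iff_prefix.mp h)]
    rw [if_pos rfl, if_neg]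
    simp only [Bool.and_eq_true, beq_iff_eq]
    intro hcon
    obtain ⟨⟨_, htake⟩, _⟩ := hcon
    exact hp (htake ▸ List.take_prefix _ _)

-- Source B's scan computes the joined fixed segments; cur = seg.reverse links the two accumulators
theorem pvFold_eq (l : List Char) : ∀ (out seg : List Char),
    (List.foldl pvStepB (out, seg) l).1 ++ pvFixB (List.foldl pvStepB (out, seg) l).2
      = out ++ PySem.Chars.join ['-'] ((pvSegs l seg.reverse).map pvFixB) := by
  induction l with
  | nil =>
    intro out seg
    simp [pvSegs, PySem.Chars.join_singleton]
  | cons c rest ih =>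
    intro out seg
    by_cases hc : c = '-'
    · subst hc
      simp only [List.foldl_cons, pvStepB, if_pos trivial, reduceIte]
      rw [ih (out ++ pvFixB seg ++ ['-']) []]
      simp only [pvSegs, if_pos rfl, List.reverse_nil, List.reverse_reverse, List.map_cons]
      obtain ⟨a, as, hsegs⟩ : ∃ a as, pvSegs rest [] = a :: as := by
        cases h : pvSegs rest [] with
        | nil => exact absurd h (pvSegs_ne_nil rest [])
        | cons a as => exact ⟨a, as, rfl⟩
      rw [hsegs]
      simp [PySem.Chars.join_cons_cons, List.append_assoc]
    · simp only [List.foldl_cons, pvStepB, if_neg hc]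
      rw [ih out (seg ++ [c])]
      simp [pvSegs, hc]

-- ===== VERDICT (by name: the statement is the Claim_ definition above) =====
theorem normalize_mnc_qualifier_spec : Claim_equal_normalize_mnc_qualifier := by
  intro name _
  show String.ofList (PySem.Chars.join ['-'] ((PySem.Chars.splitOn name.toList ['-']).map pvFixA))
      = String.ofList ((List.foldl pvStepB ([], []) name.toList).1
          ++ pvFixB (List.foldl pvStepB ([], []) name.toList).2)
  have h := pvFold_eq name.toList [] []
  simp only [List.reverse_nil, List.nil_append] at h
  rw [pvSplitOn_eq, h, List.map_congr_left fun x _ => pvFix_eq x]
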